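-- pv_equiv track=rewrite | github.com/AniHub-N/adaptive-retrieval-ai | Retrieval RAG/src/chunker.py | chunk_sections
-- ===== SOURCE A (Python) =====
-- SECTION_HEADERS = [
--     "abstract",
--     "introduction",
--     "background",
--     "method",
--     "methods",
--     "approach",
--     "experiment",
--     "results",
--     "discussion",
--     "conclusion"
-- ]
--
-- def split_into_sections(text):
--
--     lines = text.split("\n")
--
--     sections = []
--     current_section = "unknown"
--     buffer = []
--
--     for line in lines:
--
--         clean = line.strip().lower()
--
--         if clean in SECTION_HEADERS:
--
--             if buffer:
--                 sections.append(
--                     (current_section, " ".join(buffer))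
--                 )
--                 buffer = []
--
--             current_section = clean
--         else:
--             buffer.append(line)
--
--     if buffer:
--         sections.append((current_section, " ".join(buffer)))
--
--     return sections
--
-- def chunk_sections(text, chunk_size=250):
--
--     sections = split_into_sections(text)
--
--     chunks = []
--
--     for section, content in sections:
--
--         words = content.split()
--
--         for i in range(0, len(words), chunk_size):
--
--             chunk = " ".join(words[i:i + chunk_size])
--
--             chunks.append({
--                 "text": chunk,
--                 "section": section
--             })
--
--     return chunks
-- ===== SOURCE B (Python) =====
-- SECTION_HEADERS = [
--     "abstract",
--     "introduction",
--     "background",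
--     "method",
--     "methods",
--     "approach",
--     "experiment",
--     "results",
--     "discussion",
--     "conclusion"
-- ]
--
-- def _flush(chunks, section, words, chunk_size):
--     chunks.extend({"text": " ".join(words[i:i + chunk_size]), "section": section}
--                   for i in range(0, len(words), chunk_size))
--
-- def chunk_sections(text, chunk_size=250):
--     chunks = []
--     current = "unknown"
--     words = []
--     for line in text.split("\n"):
--         clean = line.strip().lower()
--         if clean in SECTION_HEADERS:
--             _flush(chunks, current, words, chunk_size)
--             current = clean
--             words = []
--         else:
--             words.extend(line.split())
--     _flush(chunks, current, words, chunk_size)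
--     return chunks
-- ===== Notes on version B (the rewrite author's own statement) =====
-- stated objective: simpler
-- what changed: B fuses A's two passes (build a (section, content) list by joining buffered lines, then re-split each content into words and chunk it) into one pass over the lines that accumulates the word list directly via line.split() and flushes it into chunks at each header and at the end, never materialising joined section strings.
-- outside the precondition, e.g. on chunk_sections('abstract', 0): A returns [], B raises ValueError
import Mathlib
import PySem

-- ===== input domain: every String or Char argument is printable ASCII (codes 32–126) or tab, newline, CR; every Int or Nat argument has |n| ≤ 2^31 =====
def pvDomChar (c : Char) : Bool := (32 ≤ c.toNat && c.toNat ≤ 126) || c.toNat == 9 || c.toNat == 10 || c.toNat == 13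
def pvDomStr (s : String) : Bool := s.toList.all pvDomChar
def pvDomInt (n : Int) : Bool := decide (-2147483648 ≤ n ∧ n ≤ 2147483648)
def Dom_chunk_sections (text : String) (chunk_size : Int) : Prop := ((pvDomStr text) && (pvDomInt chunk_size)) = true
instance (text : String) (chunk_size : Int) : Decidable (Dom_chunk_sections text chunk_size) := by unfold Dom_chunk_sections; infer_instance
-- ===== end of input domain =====

-- B fuses section splitting and chunking into one pass over the lines, accumulating
-- words directly instead of building an intermediate (section, content) list (objective: simpler decomposition).


-- ===== PORT A =====
def SECTION_HEADERS : List String :=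
  ["abstract", "introduction", "background", "method", "methods",
   "approach", "experiment", "results", "discussion", "conclusion"]

-- the loop body of split_into_sections: state = (sections, current_section, buffer)
def sectStep (st : List (String × String) × String × List String) (line : String) :
    List (String × String) × String × List String :=
  let (sections, current, buffer) := st
  let clean := PySem.Str.lower (PySem.Str.strip line)
  if clean ∈ SECTION_HEADERS then
    if buffer ≠ [] then (sections ++ [(current, PySem.Str.join " " buffer)], clean, [])
    else (sections, clean, [])
  else (sections, current, buffer ++ [line])

def split_into_sections (text : String) : List (String × String) :=
  let lines := (PySem.Str.split? text "\n").getD []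
  let st := lines.foldl sectStep ([], "unknown", [])
  if st.2.2 ≠ [] then st.1 ++ [(st.2.1, PySem.Str.join " " st.2.2)] else st.1

-- the loop body of chunk_sections: per (section, content), append one chunk per range index
def chunkStep (chunk_size : Int) (chunks : List (List (String × String)))
    (sc : String × String) : List (List (String × String)) :=
  let words := PySem.Str.split₀ sc.2
  (PySem.List.pyRange 0 (words.length : Int) chunk_size).foldl
    (fun chunks i =>
      let chunk := PySem.Str.join " " (PySem.List.slice words (some i) (some (i + chunk_size)))
      chunks ++ [[("text", chunk), ("section", sc.1)]])
    chunks

def chunk_sections (text : String) (chunk_size : Int) : List (List (String × String)) :=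
  (split_into_sections text).foldl (chunkStep chunk_size) []

-- ===== PORT B =====
-- _flush: one chunk per range index over the accumulated words
def flushChunks (sect : String) (words : List String) (chunk_size : Int) :
    List (List (String × String)) :=
  (PySem.List.pyRange 0 (words.length : Int) chunk_size).map
    (fun i => [("text", PySem.Str.join " " (PySem.List.slice words (some i) (some (i + chunk_size)))),
               ("section", sect)])

-- the single loop body of B: state = (chunks, current_section, words)
def altStep (chunk_size : Int)
    (st : List (List (String × String)) × String × List String) (line : String) :
    List (List (String × String)) × String × List String :=
  let (chunks, current, words) := st
  let clean := PySem.Str.lower (PySem.Str.strip line)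
  if clean ∈ SECTION_HEADERS then
    (chunks ++ flushChunks current words chunk_size, clean, [])
  else (chunks, current, words ++ PySem.Str.split₀ line)

def chunk_sections_alt (text : String) (chunk_size : Int) : List (List (String × String)) :=
  let lines := (PySem.Str.split? text "\n").getD []
  let st := lines.foldl (altStep chunk_size) ([], "unknown", [])
  st.1 ++ flushChunks st.2.1 st.2.2 chunk_size

-- ===== PRECONDITION & SPEC =====
-- Pre_ excludes chunk_size = 0, on which A raises ValueError (range step 0) whenever any section
-- content was buffered; on the remaining all-header texts A returns [] while B raises.
def Pre_chunk_sections (text : String) (chunk_size : Int) : Prop := chunk_size ≠ 0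
instance (text : String) (chunk_size : Int) : Decidable (Pre_chunk_sections text chunk_size) := by
  unfold Pre_chunk_sections; infer_instance

def pvWitness_chunk_sections : String × Int := ("introduction\nhello world and more", 2)

def Spec_chunk_sections (text : String) (chunk_size : Int) (out : List (List (String × String))) : Prop := out = chunk_sections_alt text chunk_size
instance (text : String) (chunk_size : Int) (out : List (List (String × String))) : Decidable (Spec_chunk_sections text chunk_size out) := by unfold Spec_chunk_sections; infer_instance

-- ===== CLAIM (what is proved, stated in full; the proofs are below) =====
def Claim_equal_chunk_sections : Prop := ∀ (text : String) (chunk_size : Int), Dom_chunk_sections text chunk_size → Pre_chunk_sections text chunk_size → Spec_chunk_sections text chunk_size (chunk_sections text chunk_size)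

-- ===== LEMMAS AND PROOFS =====

-- proof-side helpers
def wordsOfB (buf : List String) : List String := (buf.map PySem.Str.split₀).flatten

def chunkAll (chunk_size : Int) (sections : List (String × String)) :
    List (List (String × String)) :=
  sections.flatMap (fun sc => flushChunks sc.1 (PySem.Str.split₀ sc.2) chunk_size)

lemma pyRange_zero_self (step : Int) : PySem.List.pyRange 0 0 step = [] := by
  simp [PySem.List.pyRange]

lemma flushChunks_nil (sect : String) (cs : Int) : flushChunks sect [] cs = [] := by
  simp [flushChunks, pyRange_zero_self]

lemma go_acc (s : List Char) : ∀ (cur : List Char) (acc : List (List Char)),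
    PySem.Chars.split₀.go s cur acc = acc.reverse ++ PySem.Chars.split₀.go s cur [] := by
  induction s with
  | nil =>
    intro cur acc
    by_cases h : cur.isEmpty <;> simp [PySem.Chars.split₀.go, h]
  | cons c rest ih =>
    intro cur acc
    by_cases hs : PySem.Chars.isspace c <;> by_cases he : cur.isEmpty
    · rw [show PySem.Chars.split₀.go (c :: rest) cur acc = PySem.Chars.split₀.go rest [] acc by
          simp [PySem.Chars.split₀.go, hs, he],
        show PySem.Chars.split₀.go (c :: rest) cur [] = PySem.Chars.split₀.go rest [] [] by
          simp [PySem.Chars.split₀.go, hs, he]]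
      exact ih [] acc
    · rw [show PySem.Chars.split₀.go (c :: rest) cur acc
            = PySem.Chars.split₀.go rest [] (cur.reverse :: acc) by
          simp [PySem.Chars.split₀.go, hs, he],
        show PySem.Chars.split₀.go (c :: rest) cur []
            = PySem.Chars.split₀.go rest [] [cur.reverse] by
          simp [PySem.Chars.split₀.go, hs, he],
        ih [] (cur.reverse :: acc), ih [] [cur.reverse]]
      simp
    all_goals
      rw [show PySem.Chars.split₀.go (c :: rest) cur acc
            = PySem.Chars.split₀.go rest (c :: cur) acc by
          simp [PySem.Chars.split₀.go, hs],
        show PySem.Chars.split₀.go (c :: rest) cur []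
            = PySem.Chars.split₀.go rest (c :: cur) [] by
          simp [PySem.Chars.split₀.go, hs]]
      exact ih (c :: cur) acc

lemma go_space (c : Char) (hc : PySem.Chars.isspace c = true) (xs : List Char) :
    ∀ (ys cur : List Char) (acc : List (List Char)),
    PySem.Chars.split₀.go (xs ++ c :: ys) cur acc
      = PySem.Chars.split₀.go xs cur acc ++ PySem.Chars.split₀.go ys [] [] := by
  induction xs with
  | nil =>
    intro ys cur acc
    by_cases he : cur.isEmpty
    · rw [List.nil_append,
        show PySem.Chars.split₀.go (c :: ys) cur acc = PySem.Chars.split₀.go ys [] acc by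
          simp [PySem.Chars.split₀.go, hc, he],
        go_acc]
      simp [PySem.Chars.split₀.go, he]
    · rw [List.nil_append,
        show PySem.Chars.split₀.go (c :: ys) cur acc
            = PySem.Chars.split₀.go ys [] (cur.reverse :: acc) by
          simp [PySem.Chars.split₀.go, hc, he],
        go_acc]
      simp [PySem.Chars.split₀.go, he]
  | cons d xs ih =>
    intro ys cur acc
    rw [List.cons_append]
    by_cases hs : PySem.Chars.isspace d
    · by_cases he : cur.isEmpty
      · rw [show PySem.Chars.split₀.go (d :: (xs ++ c :: ys)) cur acc
              = PySem.Chars.split₀.go (xs ++ c :: ys) [] acc by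
            simp [PySem.Chars.split₀.go, hs, he],
          show PySem.Chars.split₀.go (d :: xs) cur acc = PySem.Chars.split₀.go xs [] acc by
            simp [PySem.Chars.split₀.go, hs, he]]
        exact ih ys [] acc
      · rw [show PySem.Chars.split₀.go (d :: (xs ++ c :: ys)) cur acc
              = PySem.Chars.split₀.go (xs ++ c :: ys) [] (cur.reverse :: acc) by
            simp [PySem.Chars.split₀.go, hs, he],
          show PySem.Chars.split₀.go (d :: xs) cur acc
              = PySem.Chars.split₀.go xs [] (cur.reverse :: acc) by
            simp [PySem.Chars.split₀.go, hs, he]]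
        exact ih ys [] (cur.reverse :: acc)
    · rw [show PySem.Chars.split₀.go (d :: (xs ++ c :: ys)) cur acc
            = PySem.Chars.split₀.go (xs ++ c :: ys) (d :: cur) acc by
          simp [PySem.Chars.split₀.go, hs],
        show PySem.Chars.split₀.go (d :: xs) cur acc
            = PySem.Chars.split₀.go xs (d :: cur) acc by
          simp [PySem.Chars.split₀.go, hs]]
      exact ih ys (d :: cur) acc

lemma split₀_join_chars (parts : List (List Char)) :
    PySem.Chars.split₀ (PySem.Chars.join [' '] parts) = (parts.map PySem.Chars.split₀).flatten := by
  induction parts with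
  | nil => simp [PySem.Chars.join_nil, PySem.Chars.split₀, PySem.Chars.split₀.go]
  | cons p rest ih =>
    cases rest with
    | nil => simp [PySem.Chars.join_singleton]
    | cons q rest' =>
      rw [PySem.Chars.join_cons_cons, List.append_assoc, List.singleton_append]
      show PySem.Chars.split₀.go (p ++ ' ' :: PySem.Chars.join [' '] (q :: rest')) [] [] = _
      rw [go_space ' ' (by decide) p, List.map_cons, List.flatten_cons, ← ih]
      rfl

lemma split₀_join_str (parts : List String) :
    PySem.Str.split₀ (PySem.Str.join " " parts) = (parts.map PySem.Str.split₀).flatten := by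
  unfold PySem.Str.split₀
  rw [PySem.Str.toList_join, show (" ".toList) = [' '] by decide, split₀_join_chars]
  simp [List.map_flatten, Function.comp_def]

lemma foldl_append_singleton {α β : Type} (f : α → β) :
    ∀ (l : List α) (acc : List β), l.foldl (fun a i => a ++ [f i]) acc = acc ++ l.map f := by
  intro l
  induction l with
  | nil => simp
  | cons i rest ih => intro acc; rw [List.foldl_cons, ih]; simp

lemma chunkStep_eq (cs : Int) (chunks : List (List (String × String))) (sc : String × String) :
    chunkStep cs chunks sc = chunks ++ flushChunks sc.1 (PySem.Str.split₀ sc.2) cs := by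
  unfold chunkStep flushChunks
  exact foldl_append_singleton _ _ chunks

lemma foldl_chunkStep (cs : Int) (sections : List (String × String)) :
    ∀ (acc : List (List (String × String))),
    sections.foldl (chunkStep cs) acc = acc ++ chunkAll cs sections := by
  induction sections with
  | nil => simp [chunkAll]
  | cons sc rest ih =>
    intro acc
    rw [List.foldl_cons, ih, chunkStep_eq]
    simp [chunkAll, List.append_assoc]

lemma chunkAll_append (cs : Int) (s t : List (String × String)) :
    chunkAll cs (s ++ t) = chunkAll cs s ++ chunkAll cs t := by
  simp [chunkAll]

-- B's flush of the accumulated words equals A's chunking of the joined buffer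
lemma flush_wordsOf (cs : Int) (cur : String) (buf : List String) :
    flushChunks cur (wordsOfB buf) cs
      = chunkAll cs (if buf ≠ [] then [(cur, PySem.Str.join " " buf)] else []) := by
  by_cases h : buf = []
  · subst h
    simp [wordsOfB, flushChunks_nil, chunkAll]
  · simp only [h, ne_eq, not_false_iff, if_pos, chunkAll, List.flatMap_cons, List.flatMap_nil,
      List.append_nil]
    rw [split₀_join_str]
    rfl

lemma main_fusion (cs : Int) (lines : List String) :
    ∀ (sections : List (String × String)) (cur : String) (buf : List String),
    (let st := lines.foldl (altStep cs) (chunkAll cs sections, cur, wordsOfB buf)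
     st.1 ++ flushChunks st.2.1 st.2.2 cs)
      = chunkAll cs (let st' := lines.foldl sectStep (sections, cur, buf)
          if st'.2.2 ≠ [] then st'.1 ++ [(st'.2.1, PySem.Str.join " " st'.2.2)] else st'.1) := by
  induction lines with
  | nil =>
    intro sections cur buf
    simp only [List.foldl_nil]
    rw [flush_wordsOf]
    by_cases h : buf = []
    · subst h; simp [chunkAll]
    · simp [h, chunkAll_append]
  | cons line rest ih =>
    intro sections cur buf
    by_cases hh : PySem.Str.lower (PySem.Str.strip line) ∈ SECTION_HEADERS
    · by_cases hb : buf = []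
      · subst hb
        simp only [List.foldl_cons, altStep, sectStep, hh, if_pos, ne_eq,
          if_neg, wordsOfB, List.map_nil, List.flatten_nil, flushChunks_nil, List.append_nil]
        have := ih sections (PySem.Str.lower (PySem.Str.strip line)) []
        simpa [wordsOfB] using this
      · simp only [List.foldl_cons, altStep, sectStep, hh, if_pos, hb, ne_eq, not_false_iff]
        rw [show flushChunks cur (wordsOfB buf) cs
              = chunkAll cs [(cur, PySem.Str.join " " buf)] by
            rw [flush_wordsOf]; simp [hb],
          ← chunkAll_append]
        have := ih (sections ++ [(cur, PySem.Str.join " " buf)])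
          (PySem.Str.lower (PySem.Str.strip line)) []
        simpa [wordsOfB] using this
    · simp only [List.foldl_cons, altStep, sectStep, hh, if_neg, not_false_iff]
      have := ih sections cur (buf ++ [line])
      simpa [wordsOfB] using this

-- ===== VERDICT (by name: the statement is the Claim_ definition above) =====
theorem chunk_sections_spec : Claim_equal_chunk_sections := by
  intro text cs _ _
  unfold Spec_chunk_sections chunk_sections chunk_sections_alt split_into_sections
  have h := main_fusion cs ((PySem.Str.split? text "\n").getD []) [] "unknown" []
  simp only [chunkAll, List.flatMap_nil, wordsOfB, List.map_nil, List.flatten_nil] at h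
  rw [foldl_chunkStep]
  simp only [List.nil_append] at h ⊢
  exact h.symm
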